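-- pv_equiv track=rewrite | github.com/arching3/semi-autonomous-car | source/cameraV2.py | find_max_ct
-- ===== SOURCE A (Python) =====
-- def find_max_ct(contours):
--
--     try:
--         maxC = []
--         for i in contours:
--             maxC.append(len(i))
--         temp = max(maxC)
--         for i in range(len(maxC)):
--             maxC[i] = temp - maxC[i]
--
--         Max_ct = contours[maxC.index(0)]
--         return Max_ct
--     except:
--         return None
-- ===== SOURCE B (Python) =====
-- def find_max_ct(contours):
--     try:
--         return contours[max(range(len(contours)), key=lambda i: len(contours[i]))]
--     except:
--         return None
-- ===== Notes on version B (the rewrite author's own statement) =====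
-- stated objective: idiomatic
-- what changed: Replaces the three-pass length-list / subtract-max / index-of-zero dance with a single index-based argmax (max over range(len(contours)) keyed by contour length), keeping the same try/except-None shell.
import Mathlib
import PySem

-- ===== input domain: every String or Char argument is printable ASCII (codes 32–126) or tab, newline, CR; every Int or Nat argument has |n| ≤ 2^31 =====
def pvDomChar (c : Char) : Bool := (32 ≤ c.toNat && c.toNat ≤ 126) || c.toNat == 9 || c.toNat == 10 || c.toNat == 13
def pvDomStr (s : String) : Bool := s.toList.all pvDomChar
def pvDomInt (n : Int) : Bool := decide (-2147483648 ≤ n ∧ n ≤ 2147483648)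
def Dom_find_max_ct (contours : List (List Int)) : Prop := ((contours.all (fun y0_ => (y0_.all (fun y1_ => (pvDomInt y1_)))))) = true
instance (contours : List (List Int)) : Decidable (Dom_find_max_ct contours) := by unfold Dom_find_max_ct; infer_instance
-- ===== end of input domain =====

-- B replaces A's three passes (length list, subtract-max, index of zero) with one index-based
-- argmax inside the same try/except-None shell; same first-maximal-contour result, including none on [].

-- ===== PORT A =====
-- try: maxC = [len(i) for each i]; temp = max(maxC) (ValueError on [] → except → None);
-- maxC[i] = temp - maxC[i] for each i; return contours[maxC.index(0)]
def find_max_ct (contours : List (List Int)) : Option (List Int) :=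
  let maxC : List Int := contours.foldl (fun acc i => acc ++ [(i.length : Int)]) []
  match PySem.List.max? maxC (fun x => x) with
  | none => none
  | some temp =>
    let maxC2 := (PySem.List.pyRange 0 (maxC.length : Int)).foldl
      (fun m i => m.set i.toNat (temp - PySem.List.pyGetD m i 0)) maxC
    match PySem.List.index? maxC2 (0 : Int) with
    | none => none
    | some idx => PySem.List.pyGet? contours (idx : Int)

-- ===== PORT B =====
-- contours[max(range(len(contours)), key=lambda i: len(contours[i]))], except → None
-- (max([]) raises → none; pyGetD's default is never used: every i is in range)
def find_max_ct_alt (contours : List (List Int)) : Option (List Int) :=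
  match PySem.List.max? (PySem.List.pyRange 0 (contours.length : Int))
      (fun i => (PySem.List.pyGetD contours i []).length) with
  | none => none
  | some i => PySem.List.pyGet? contours i

-- ===== PRECONDITION & SPEC =====
def Spec_find_max_ct (contours : List (List Int)) (out : Option (List Int)) : Prop := out = find_max_ct_alt contours
instance (contours : List (List Int)) (out : Option (List Int)) : Decidable (Spec_find_max_ct contours out) := by unfold Spec_find_max_ct; infer_instance

-- ===== CLAIM (what is proved, stated in full; the proofs are below) =====
def Claim_equal_find_max_ct : Prop := ∀ (contours : List (List Int)), Dom_find_max_ct contours → Spec_find_max_ct contours (find_max_ct contours)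

-- ===== LEMMAS AND PROOFS =====

-- the max?-fold with a some-accumulator is a plain binary-max fold
lemma maxFoldSome {α κ : Type} [LinearOrder κ] (key : α → κ) (t : List α) :
    ∀ m : α, t.foldl (fun acc x => match acc with
        | none => some x
        | some m => if key m < key x then some x else some m) (some m)
      = some (t.foldl (fun a b => if key a < key b then b else a) m) := by
  induction t with
  | nil => intro m; rfl
  | cons y t ih =>
    intro m
    simp only [List.foldl_cons]
    by_cases h : key m < key y <;> simp [h, ih]

-- the binary-max fold returns the FIRST element attaining the maximum
lemma foldlMaxFirst {α κ : Type} [LinearOrder κ] (key : α → κ) :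
    ∀ (t : List α) (x : α) (k : Nat) (hk : k < (x :: t).length)
      (hmax : ∀ j (hj : j < (x :: t).length), key ((x :: t)[j]) ≤ key ((x :: t)[k]))
      (hfirst : ∀ j (hj : j < k), key ((x :: t)[j]'(by omega)) < key ((x :: t)[k])),
      t.foldl (fun a b => if key a < key b then b else a) x = (x :: t)[k] := by
  intro t
  induction t with
  | nil =>
    intro x k hk hmax hfirst
    have hk0 : k = 0 := by simp only [List.length_cons, List.length_nil] at hk; omega
    subst hk0
    rfl
  | cons y t ih =>
    intro x k hk hmax hfirst
    simp only [List.foldl_cons]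
    match k with
    | 0 =>
      have hyx : key y ≤ key x := hmax 1 (by simp)
      rw [if_neg (not_lt.mpr hyx)]
      exact ih x 0 (by simp)
        (by intro j hj
            match j with
            | 0 => exact le_refl _
            | j + 1 =>
              exact hmax (j + 2) (by simp only [List.length_cons] at hj ⊢; omega))
        (by intro j hj; omega)
    | 1 =>
      have hx : key x < key y := hfirst 0 (by omega)
      rw [if_pos hx]
      exact ih y 0 (by simp)
        (by intro j hj
            match j with
            | 0 => exact le_refl _
            | j + 1 =>
              exact hmax (j + 2) (by simp only [List.length_cons] at hj ⊢; omega))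
        (by intro j hj; omega)
    | k' + 2 =>
      have hx : key x < key ((x :: y :: t)[k' + 2]) := hfirst 0 (by omega)
      have hy : key y < key ((x :: y :: t)[k' + 2]) := hfirst 1 (by omega)
      have hg : key (if key x < key y then y else x) < key ((x :: y :: t)[k' + 2]) := by
        split <;> assumption
      exact ih (if key x < key y then y else x) (k' + 1)
        (by simp only [List.length_cons] at hk ⊢; omega)
        (by intro j hj
            match j with
            | 0 => exact le_of_lt hg
            | j + 1 =>
              exact hmax (j + 2) (by simp only [List.length_cons] at hj ⊢; omega))
        (by intro j hj
            match j with
            | 0 => exact hg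
            | j + 1 =>
              exact hfirst (j + 2) (by omega))

-- max? returns the first element attaining the maximal key
lemma max?First {α κ : Type} [LinearOrder κ] (key : α → κ) (xs : List α) (k : Nat) (hk : k < xs.length)
    (hmax : ∀ j (hj : j < xs.length), key (xs[j]) ≤ key (xs[k]))
    (hfirst : ∀ j (hj : j < k), key (xs[j]'(by omega)) < key (xs[k])) :
    PySem.List.max? xs key = some (xs[k]) := by
  cases xs with
  | nil => simp at hk
  | cons x t =>
    show List.foldl _ none (x :: t) = _
    simp only [List.foldl_cons]
    exact (maxFoldSome key t x).trans (congrArg some (foldlMaxFirst key t x k hk hmax hfirst))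

-- A's in-place update loop maps (temp - ·) over the list
lemma setLoopAux (temp : Int) :
    ∀ (post pre : List Int),
      (List.range' pre.length post.length).foldl (fun m j => m.set j (temp - m.getD j 0)) (pre ++ post)
        = pre ++ post.map (fun x => temp - x) := by
  intro post
  induction post with
  | nil => intro pre; simp
  | cons x t ih =>
    intro pre
    simp only [List.length_cons, List.range'_succ, List.foldl_cons]
    have h1 : (pre ++ x :: t).getD pre.length 0 = x := by
      simp [List.getD_eq_getElem?_getD]
    have h2 : (pre ++ x :: t).set pre.length (temp - x) = pre ++ (temp - x) :: t := by
      rw [List.set_append]; simp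
    rw [h1, h2]
    have := ih (pre ++ [temp - x])
    simpa using this

lemma loopEq (temp : Int) (lens : List Int) :
    (PySem.List.pyRange 0 (lens.length : Int)).foldl
        (fun m i => m.set i.toNat (temp - PySem.List.pyGetD m i 0)) lens
      = lens.map (fun x => temp - x) := by
  rw [PySem.List.pyRange_zero_natCast, List.foldl_map]
  simp only [Int.toNat_natCast, PySem.List.pyGetD_natCast]
  have h := setLoopAux temp lens []
  simp only [List.length_nil, List.nil_append] at h
  rw [List.range_eq_range']
  exact h

-- index of 0 in (temp - ·)-mapped list = index of temp
lemma indexMapSub (temp : Int) (l : List Int) :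
    PySem.List.index? (l.map (fun x => temp - x)) (0 : Int) = PySem.List.index? l temp := by
  rw [PySem.List.index?_eq_idxOf?, PySem.List.index?_eq_idxOf?]
  unfold List.idxOf?
  rw [List.findIdx?_map]
  congr 1
  funext x
  rw [Bool.eq_iff_iff]
  simp only [Function.comp_apply, beq_iff_eq]
  omega

-- ===== VERDICT (by name: the statement is the Claim_ definition above) =====
theorem find_max_ct_spec : Claim_equal_find_max_ct := by
  intro contours _dom
  show find_max_ct contours = find_max_ct_alt contours
  unfold find_max_ct find_max_ct_alt
  rw [PySem.List.foldl_append_singleton_eq_map]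
  simp only [List.nil_append]
  cases hmx : PySem.List.max? (contours.map (fun i => (i.length : Int))) (fun x => x) with
  | none =>
    have hnil : contours = [] := by
      have h := (PySem.List.max?_eq_none_iff _ _).mp hmx
      simpa using h
    subst hnil
    rfl
  | some temp =>
    simp only [List.length_map]
    have hloop := loopEq temp (contours.map fun i => (i.length : Int))
    simp only [List.length_map] at hloop
    rw [hloop, indexMapSub]
    have hmem : temp ∈ contours.map (fun i => (i.length : Int)) := PySem.List.max?_mem hmx
    obtain ⟨k, hindex⟩ := Option.isSome_iff_exists.mp
      ((PySem.List.index?_isSome_iff _ _).mpr hmem)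
    rw [hindex]
    obtain ⟨hk, hek, hne⟩ := PySem.List.getElem_of_index?_eq_some hindex
    have hkc : k < contours.length := by simpa using hk
    have hmaxlens := PySem.List.max?_isMax hmx
    have hlens : ∀ (j : Nat) (hj : j < contours.length),
        (contours.map (fun i => (i.length : Int)))[j]'(by simpa using hj)
          = ((contours[j]'hj).length : Int) := by
      intro j hj; simp
    have hekk : ((contours[k]'hkc).length : Int) = temp := by
      rw [← hek, hlens k hkc]
    have hxlen : (PySem.List.pyRange 0 (contours.length : Int)).length = contours.length := by
      rw [PySem.List.pyRange_zero_natCast]; simp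
    have hel : ∀ (j : Nat) (hj : j < contours.length),
        (PySem.List.pyRange 0 (contours.length : Int))[j]'(by omega) = (j : Int) := by
      intro j hj
      simp [PySem.List.pyRange_zero_natCast]
    have hkeyv : ∀ (j : Nat) (hj : j < contours.length),
        (PySem.List.pyGetD contours (j : Int) []).length = (contours[j]'hj).length := by
      intro j hj
      rw [PySem.List.pyGetD_natCast, List.getD_eq_getElem?_getD, List.getElem?_eq_getElem hj]
      rfl
    have hub : ∀ (j : Nat) (hj : j < contours.length),
        ((contours[j]'hj).length : Int) ≤ temp := by
      intro j hj
      have h := hmaxlens ((contours.map (fun i => (i.length : Int)))[j]'(by simpa using hj))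
        (List.getElem_mem _)
      rwa [hlens j hj] at h
    have hB := max?First (fun i => (PySem.List.pyGetD contours i []).length)
      (PySem.List.pyRange 0 (contours.length : Int)) k (by omega)
      (by intro j hj
          dsimp only
          have hj' : j < contours.length := by omega
          rw [hel j hj', hel k hkc, hkeyv j hj', hkeyv k hkc]
          have h1 := hub j hj'
          omega)
      (by intro j hj
          dsimp only
          have hj' : j < contours.length := by omega
          rw [hel j hj', hel k hkc, hkeyv j hj', hkeyv k hkc]
          have h1 := hub j hj'
          have h2 : (contours.map (fun i => (i.length : Int)))[j]'(by simpa using hj') ≠ temp :=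
            hne j hj
          rw [hlens j hj'] at h2
          omega)
    rw [hB, hel k hkc]
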